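-- pv_equiv track=rewrite | github.com/gfernandf/agent-skill-registry | tools/registry_stats.py | is_nondefault_metadata
-- ===== SOURCE A (Python) =====
-- from typing import Any
--
-- def is_nondefault_metadata(metadata: Any, defaults: dict[str, Any]) -> bool:
--     if not isinstance(metadata, dict):
--         return False
--
--     for key, default_value in defaults.items():
--         value = metadata.get(key, default_value)
--         if value != default_value:
--             return True
--
--     extra_keys = set(metadata.keys()) - set(defaults.keys())
--     return bool(extra_keys)
-- ===== SOURCE B (Python) =====
-- from typing import Any
--
-- def is_nondefault_metadata(metadata: Any, defaults: dict[str, Any]) -> bool: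
--     if not isinstance(metadata, dict):
--         return False
--     for key, value in metadata.items():
--         if key not in defaults or value != defaults[key]:
--             return True
--     return False
-- ===== Notes on version B (the rewrite author's own statement) =====
-- stated objective: simpler
-- what changed: B replaces A's two-part structure (a loop over defaults using metadata.get plus a separate set-difference extra-key check) with a single pass over metadata.items() that reports an extra key or a changed value directly.
import Mathlib
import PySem

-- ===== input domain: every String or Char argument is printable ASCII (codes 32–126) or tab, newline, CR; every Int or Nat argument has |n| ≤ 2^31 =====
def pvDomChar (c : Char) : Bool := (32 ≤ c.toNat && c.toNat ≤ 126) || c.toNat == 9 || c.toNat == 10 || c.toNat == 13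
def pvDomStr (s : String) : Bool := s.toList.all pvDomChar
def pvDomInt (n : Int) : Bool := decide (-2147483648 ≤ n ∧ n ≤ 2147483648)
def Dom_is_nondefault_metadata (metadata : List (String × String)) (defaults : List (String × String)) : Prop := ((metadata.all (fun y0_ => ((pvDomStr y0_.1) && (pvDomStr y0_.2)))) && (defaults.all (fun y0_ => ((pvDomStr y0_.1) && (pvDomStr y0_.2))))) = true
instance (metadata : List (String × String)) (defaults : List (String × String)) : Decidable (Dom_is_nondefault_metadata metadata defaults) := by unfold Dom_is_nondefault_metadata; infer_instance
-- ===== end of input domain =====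

-- B replaces A's two-part check (loop over defaults via .get + a set-difference extra-key step)
-- with a single pass over metadata.items(); same return value, objective: simpler.


-- ===== PORT A =====
-- for key, default_value in defaults.items(): value = metadata.get(key, default_value); if value != default_value: return True
-- then: extra_keys = set(metadata.keys()) - set(defaults.keys()); return bool(extra_keys)
-- (the isinstance guard is vacuous under the type convention: metadata is always a dict here)
def is_nondefault_metadata (metadata : List (String × String)) (defaults : List (String × String)) : Bool :=
  if defaults.any (fun kv => !((PySem.Dict.mk metadata).getD kv.1 kv.2 == kv.2)) then
    true
  else
    !(PySem.Set.diff (PySem.Set.ofList ((PySem.Dict.mk metadata).keys))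
        (PySem.Set.ofList ((PySem.Dict.mk defaults).keys))).isEmpty

-- ===== PORT B =====
-- for key, value in metadata.items(): if key not in defaults or value != defaults[key]: return True
-- return False
-- ('defaults[key]' is guarded by 'key in defaults' via short-circuit 'or', so the getD fallback below is unreachable)
def is_nondefault_metadata_alt (metadata : List (String × String)) (defaults : List (String × String)) : Bool :=
  metadata.any (fun kv =>
    !(PySem.Dict.mk defaults).contains kv.1 ||
    !(kv.2 == (PySem.Dict.mk defaults).getD kv.1 kv.2))

-- ===== PRECONDITION & SPEC =====
-- Pre_ excludes association lists with duplicate keys: both arguments represent Python dicts,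
-- which cannot carry duplicate keys, so such lists correspond to no Python input at all.
def Pre_is_nondefault_metadata (metadata : List (String × String)) (defaults : List (String × String)) : Prop :=
  (metadata.map Prod.fst).Nodup ∧ (defaults.map Prod.fst).Nodup
instance (metadata : List (String × String)) (defaults : List (String × String)) : Decidable (Pre_is_nondefault_metadata metadata defaults) := by unfold Pre_is_nondefault_metadata; infer_instance
def pvWitness_is_nondefault_metadata : (List (String × String)) × (List (String × String)) :=
  ([("a", "1"), ("b", "2")], [("a", "0")])

def Spec_is_nondefault_metadata (metadata : List (String × String)) (defaults : List (String × String)) (out : Bool) : Prop := out = is_nondefault_metadata_alt metadata defaults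
instance (metadata : List (String × String)) (defaults : List (String × String)) (out : Bool) : Decidable (Spec_is_nondefault_metadata metadata defaults out) := by unfold Spec_is_nondefault_metadata; infer_instance

-- ===== CLAIM (what is proved, stated in full; the proofs are below) =====
def Claim_equal_is_nondefault_metadata : Prop := ∀ (metadata : List (String × String)) (defaults : List (String × String)), Dom_is_nondefault_metadata metadata defaults → Pre_is_nondefault_metadata metadata defaults → Spec_is_nondefault_metadata metadata defaults (is_nondefault_metadata metadata defaults)

-- ===== LEMMAS AND PROOFS =====

theorem is_nondefault_metadata_eq (metadata defaults : List (String × String))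
    (hm : (metadata.map Prod.fst).Nodup) (hd : (defaults.map Prod.fst).Nodup) :
    is_nondefault_metadata metadata defaults = is_nondefault_metadata_alt metadata defaults := by
  unfold is_nondefault_metadata is_nondefault_metadata_alt
  have hmk : ({ items := metadata } : PySem.Dict String String).keys.Nodup := by
    simpa [PySem.Dict.keys] using hm
  have hdk : ({ items := defaults } : PySem.Dict String String).keys.Nodup := by
    simpa [PySem.Dict.keys] using hd
  have hgetM : ∀ k v, ({ items := metadata } : PySem.Dict String String).get? k = some v ↔ (k, v) ∈ metadata := by
    intro k v; exact PySem.Dict.get?_eq_some_iff_mem_items _ k v hmk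
  have hgetD : ∀ k v, ({ items := defaults } : PySem.Dict String String).get? k = some v ↔ (k, v) ∈ defaults := by
    intro k v; exact PySem.Dict.get?_eq_some_iff_mem_items _ k v hdk
  rw [Bool.eq_iff_iff]
  simp only [Bool.if_true_left, Bool.or_eq_true, List.any_eq_true, Bool.not_eq_eq_eq_not,
    Bool.not_true, beq_eq_false_iff_ne, ne_eq, PySem.Dict.contains,
    List.isEmpty_eq_false_iff_exists_mem, decide_eq_true_eq, PySem.Set.diff, List.mem_filter,
    PySem.Set.mem_ofList, PySem.Set.contains, List.contains_eq_mem, decide_eq_false_iff_not, PySem.Dict.keys_mk, List.mem_map, List.any_eq_false,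
    beq_iff_eq]
  constructor
  · rintro (⟨⟨k, dv⟩, hkd, hne⟩ | ⟨k, ⟨⟨⟨k', v⟩, hkm, rfl⟩, hnot⟩⟩)
    · -- defaults loop fired
      rcases ho : ({ items := metadata } : PySem.Dict String String).get? k with _ | v
      · exact absurd (PySem.Dict.getD_of_get?_eq_none _ dv ho) hne
      · refine ⟨(k, v), (hgetM k v).1 ho, Or.inr ?_⟩
        have : ({ items := defaults } : PySem.Dict String String).getD k v = dv :=
          PySem.Dict.getD_of_get?_eq_some _ v ((hgetD k dv).2 hkd)
        rw [this]
        intro h; apply hne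
        rw [PySem.Dict.getD_of_get?_eq_some _ dv ho]; exact h
    · -- extra key
      refine ⟨(k', v), hkm, Or.inl ?_⟩
      intro p hp hpk
      exact hnot ⟨p, hp, hpk⟩
  · rintro ⟨⟨k, v⟩, hkm, h | hne⟩
    · -- key missing from defaults
      exact Or.inr ⟨k, ⟨⟨(k, v), hkm, rfl⟩, fun ⟨p, hp, hpk⟩ => h p hp hpk⟩⟩
    · -- value differs
      by_cases hk : ∃ dv, (k, dv) ∈ defaults
      · rcases hk with ⟨dv, hkd⟩
        refine Or.inl ⟨(k, dv), hkd, ?_⟩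
        have hMg : ({ items := metadata } : PySem.Dict String String).getD k dv = v :=
          PySem.Dict.getD_of_get?_eq_some _ dv ((hgetM k v).2 hkm)
        have hDg : ({ items := defaults } : PySem.Dict String String).getD k v = dv :=
          PySem.Dict.getD_of_get?_eq_some _ v ((hgetD k dv).2 hkd)
        rw [hMg]; intro h; exact hne (hDg ▸ h ▸ rfl)
      · exact Or.inr ⟨k, ⟨⟨(k, v), hkm, rfl⟩, fun ⟨⟨k', dv⟩, hp, hpk⟩ => hk ⟨dv, by simpa [← hpk] using hp⟩⟩⟩


-- ===== VERDICT (by name: the statement is the Claim_ definition above) =====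
theorem is_nondefault_metadata_spec : Claim_equal_is_nondefault_metadata := by
  intro metadata defaults _ hpre
  unfold Spec_is_nondefault_metadata
  exact (is_nondefault_metadata_eq metadata defaults hpre.1 hpre.2)
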